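-- pv_equiv track=rewrite | github.com/Changissnz/r2apart | player.py | ne_intersection
-- ===== SOURCE A (Python) =====
-- def ne_intersection(ne_addition_seq):
--     if len(ne_addition_seq) == 0:
--         return []
--
--     q0 = set(ne_addition_seq[0][0])
--     q1 = set(ne_addition_seq[0][1])
--
--     for i in range(1,len(ne_addition_seq)):
--         q0 = q0 & set(ne_addition_seq[i][0])
--         q1 = q1 & set(ne_addition_seq[i][1])
--     return (q0,q1)
-- ===== SOURCE B (Python) =====
-- def ne_intersection(ne_addition_seq):
--     if len(ne_addition_seq) == 0:
--         return []
--     n = len(ne_addition_seq)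
--     c0 = {}
--     c1 = {}
--     for row in ne_addition_seq:
--         for x in set(row[0]):
--             c0[x] = c0.get(x, 0) + 1
--         for x in set(row[1]):
--             c1[x] = c1.get(x, 0) + 1
--     q0 = {x for x, c in c0.items() if c == n}
--     q1 = {x for x, c in c1.items() if c == n}
--     return (q0, q1)
-- ===== Notes on version B (the rewrite author's own statement) =====
-- stated objective: alternative
-- what changed: A keeps two running intersection sets and intersects them with each successive row; B makes one counting pass that tallies, per column, in how many rows each element occurs, then keeps exactly the elements whose count equals the number of rows.
-- outside the precondition, e.g. on ne_intersection([]): A returns (), B returns ()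
import Mathlib
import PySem

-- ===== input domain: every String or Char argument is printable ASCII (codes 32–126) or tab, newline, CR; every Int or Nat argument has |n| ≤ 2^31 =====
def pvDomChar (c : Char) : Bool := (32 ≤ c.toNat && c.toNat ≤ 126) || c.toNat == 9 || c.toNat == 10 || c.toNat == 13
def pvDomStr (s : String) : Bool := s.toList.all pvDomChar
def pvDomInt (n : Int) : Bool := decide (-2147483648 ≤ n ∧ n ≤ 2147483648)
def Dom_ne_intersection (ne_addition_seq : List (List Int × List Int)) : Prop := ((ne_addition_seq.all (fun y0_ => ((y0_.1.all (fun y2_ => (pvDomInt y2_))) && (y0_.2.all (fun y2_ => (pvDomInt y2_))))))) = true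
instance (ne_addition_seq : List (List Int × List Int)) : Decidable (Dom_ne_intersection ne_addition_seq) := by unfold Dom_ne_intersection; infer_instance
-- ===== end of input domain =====

-- B replaces A's running pair of set intersections by one counting pass: per column it counts in how
-- many rows each element occurs and keeps those whose count equals the row count (objective: alternative).

-- ===== PORT A =====
def ne_intersection (ne_addition_seq : List (List Int × List Int)) : List Int × List Int :=
  match ne_addition_seq with
  | [] => ([], [])  -- Python A returns the empty LIST [] here (not a pair); excluded by Pre_
  | h :: t =>
    let q0 := PySem.Set.ofList h.1
    let q1 := PySem.Set.ofList h.2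
    t.foldl (fun (q : List Int × List Int) r =>
      (PySem.Set.inter q.1 (PySem.Set.ofList r.1), PySem.Set.inter q.2 (PySem.Set.ofList r.2)))
      (q0, q1)

-- ===== PORT B =====
def ne_intersection_alt (ne_addition_seq : List (List Int × List Int)) : List Int × List Int :=
  match ne_addition_seq with
  | [] => ([], [])  -- Python B returns the empty LIST [] here (not a pair); excluded by Pre_
  | _ :: _ =>
    let n : Int := ne_addition_seq.length
    let cs := ne_addition_seq.foldl
      (fun (c : PySem.Dict Int Int × PySem.Dict Int Int) row =>
        ((PySem.Set.ofList row.1).foldl (fun d x => d.insert x (d.getD x 0 + 1)) c.1,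
         (PySem.Set.ofList row.2).foldl (fun d x => d.insert x (d.getD x 0 + 1)) c.2))
      (PySem.Dict.empty, PySem.Dict.empty)
    let q0 := PySem.Set.ofList ((cs.1.items.filter (fun p => p.2 == n)).map (·.1))
    let q1 := PySem.Set.ofList ((cs.2.items.filter (fun p => p.2 == n)).map (·.1))
    (q0, q1)

-- ===== PRECONDITION & SPEC =====
-- Pre_ excludes only the empty sequence, on which A returns the empty LIST [] instead of a value of
-- the declared pair-of-sets type (both Pythons return [] there).
def Pre_ne_intersection (ne_addition_seq : List (List Int × List Int)) : Prop :=
  ne_addition_seq ≠ []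
instance (ne_addition_seq : List (List Int × List Int)) : Decidable (Pre_ne_intersection ne_addition_seq) := by unfold Pre_ne_intersection; infer_instance
def pvWitness_ne_intersection : (List (List Int × List Int)) := [([1, 2], [3]), ([2], [3, 4])]

def Spec_ne_intersection (ne_addition_seq : List (List Int × List Int)) (out : List Int × List Int) : Prop := out = ne_intersection_alt ne_addition_seq
instance (ne_addition_seq : List (List Int × List Int)) (out : List Int × List Int) : Decidable (Spec_ne_intersection ne_addition_seq out) := by unfold Spec_ne_intersection; infer_instance

-- ===== CLAIM (what is proved, stated in full; the proofs are below) =====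
def Claim_equal_ne_intersection : Prop := ∀ (ne_addition_seq : List (List Int × List Int)), Dom_ne_intersection ne_addition_seq → Pre_ne_intersection ne_addition_seq → Spec_ne_intersection ne_addition_seq (ne_intersection ne_addition_seq)

-- ===== LEMMAS AND PROOFS =====

-- A's loop: a left fold of set intersections is the first set filtered by membership in all later rows.
theorem foldl_inter_eq_filter (ts : List (List Int)) (S : List Int) :
    ts.foldl (fun q r => PySem.Set.inter q (PySem.Set.ofList r)) S
      = S.filter (fun x => decide (∀ r ∈ ts, x ∈ r)) := by
  induction ts generalizing S with
  | nil => simp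
  | cons r ts ih =>
    rw [List.foldl_cons, ih]
    simp only [PySem.Set.inter, List.filter_filter]
    apply List.filter_congr
    intro x _
    simp [PySem.Set.mem_ofList, Bool.and_comm]

-- proof-only abbreviation: B's counting loop over one column
def colDict (rs : List (List Int)) (d : PySem.Dict Int Int) : PySem.Dict Int Int :=
  rs.foldl (fun d r => (PySem.Set.ofList r).foldl (fun d x => d.insert x (d.getD x 0 + 1)) d) d

theorem keys_colDict (rs : List (List Int)) (d : PySem.Dict Int Int) :
    (colDict rs d).keys = PySem.Set.update d.keys (rs.flatMap (fun r => PySem.Set.ofList r)) := by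
  induction rs generalizing d with
  | nil => simp [colDict]
  | cons r rs ih =>
    simp only [colDict, List.foldl_cons] at *
    rw [ih, PySem.Dict.keys_foldl_insert, List.flatMap_cons, PySem.Set.update_append]

theorem nodup_keys_colDict (rs : List (List Int)) (d : PySem.Dict Int Int)
    (h : d.keys.Nodup) : (colDict rs d).keys.Nodup := by
  induction rs generalizing d with
  | nil => simpa [colDict]
  | cons r rs ih =>
    simp only [colDict, List.foldl_cons] at *
    exact ih _ (PySem.Dict.nodup_keys_foldl_insert _ _ _ h)

-- the counter's value at v is the number of rows whose column contains v
theorem getD_colDict (rs : List (List Int)) (d : PySem.Dict Int Int) (v : Int) :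
    (colDict rs d).getD v 0 = d.getD v 0 + (rs.countP (fun r => decide (v ∈ r)) : Int) := by
  induction rs generalizing d with
  | nil => simp [colDict]
  | cons r rs ih =>
    simp only [colDict, List.foldl_cons] at *
    rw [ih, PySem.Dict.getD_foldl_insert_add_one, List.countP_cons]
    by_cases hv : v ∈ r
    · rw [List.count_eq_one_of_mem (PySem.Set.nodup_ofList r) (by simpa [PySem.Set.mem_ofList])]
      simp [hv]; ring
    · rw [List.count_eq_zero_of_not_mem (by simpa [PySem.Set.mem_ofList])]
      simp [hv]

-- one column: A's intersection fold equals B's count-and-filter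
theorem col_main (a : List Int) (ts : List (List Int)) :
    ts.foldl (fun q r => PySem.Set.inter q (PySem.Set.ofList r)) (PySem.Set.ofList a)
      = PySem.Set.ofList
          (((colDict (a :: ts) PySem.Dict.empty).items.filter
              (fun p => p.2 == (((a :: ts).length : Nat) : Int))).map (·.1)) := by
  have hnd : (colDict (a :: ts) PySem.Dict.empty).keys.Nodup :=
    nodup_keys_colDict _ _ (by simp)
  have hgetD : ∀ x, (colDict (a :: ts) PySem.Dict.empty).getD x 0
      = (((a :: ts).countP (fun r => decide (x ∈ r)) : Nat) : Int) := by
    intro x; rw [getD_colDict]; simp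
  rw [foldl_inter_eq_filter, PySem.Dict.items_eq_map_keys _ hnd 0, List.filter_map, List.map_map]
  have hcomp1 : ((fun p : Int × Int => p.2 == (((a :: ts).length : Nat) : Int)) ∘
      (fun k => (k, (colDict (a :: ts) PySem.Dict.empty).getD k 0)))
      = fun k => (colDict (a :: ts) PySem.Dict.empty).getD k 0 == (((a :: ts).length : Nat) : Int) := rfl
  have hcomp2 : ((fun p : Int × Int => p.1) ∘
      (fun k => (k, (colDict (a :: ts) PySem.Dict.empty).getD k 0))) = id := rfl
  rw [hcomp1, hcomp2, List.map_id,
      PySem.Set.ofList_eq_self_of_nodup _ (hnd.filter _)]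
  have hkeys : (colDict (a :: ts) PySem.Dict.empty).keys = PySem.Set.ofList a ++
      (PySem.Set.ofList (ts.flatMap (fun r => PySem.Set.ofList r))).filter
         (fun y => !(PySem.Set.contains (PySem.Set.ofList a) y)) := by
    rw [keys_colDict]
    simp only [PySem.Dict.keys_empty, PySem.Set.update_nil_left, List.flatMap_cons]
    rw [PySem.Set.ofList_append, PySem.Set.ofList_ofList, PySem.Set.update_eq_append_filter]
  rw [hkeys, List.filter_append]
  have hextra : ((PySem.Set.ofList (ts.flatMap (fun r => PySem.Set.ofList r))).filter
         (fun y => !(PySem.Set.contains (PySem.Set.ofList a) y))).filter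
        (fun k => (colDict (a :: ts) PySem.Dict.empty).getD k 0 == (((a :: ts).length : Nat) : Int))
        = [] := by
    rw [List.filter_eq_nil_iff]
    intro y hy
    have hna : y ∉ a := by
      have := (List.mem_filter.mp hy).2
      simpa [PySem.Set.contains_iff, PySem.Set.mem_ofList] using this
    rw [hgetD y]
    simp only [beq_iff_eq, Nat.cast_inj, ne_eq]
    intro hcnt
    have := List.countP_eq_length.mp hcnt
    exact hna (by simpa using this _ (List.mem_cons_self))
  rw [hextra, List.append_nil]
  apply List.filter_congr
  intro x hx
  have hxa : x ∈ a := (PySem.Set.mem_ofList a x).mp hx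
  rw [hgetD x, Bool.eq_iff_iff]
  simp only [beq_iff_eq, Nat.cast_inj, decide_eq_true_eq]
  rw [List.countP_eq_length]
  constructor
  · intro h r hr
    rcases List.mem_cons.mp hr with rfl | hr
    · exact decide_eq_true hxa
    · exact decide_eq_true (h r hr)
  · intro h r hr; exact of_decide_eq_true (h r (List.mem_cons_of_mem _ hr))

-- the two ports agree on every nonempty sequence
theorem ne_intersection_cons (h : List Int × List Int) (t : List (List Int × List Int)) :
    ne_intersection (h :: t) = ne_intersection_alt (h :: t) := by
  simp only [ne_intersection, ne_intersection_alt]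
  rw [PySem.List.foldl_prod_mk
        (fun (q : List Int) (r : List Int × List Int) => PySem.Set.inter q (PySem.Set.ofList r.1))
        (fun (q : List Int) (r : List Int × List Int) => PySem.Set.inter q (PySem.Set.ofList r.2)),
      PySem.List.foldl_prod_mk
        (fun (d : PySem.Dict Int Int) (row : List Int × List Int) => (PySem.Set.ofList row.1).foldl (fun d x => d.insert x (d.getD x 0 + 1)) d)
        (fun (d : PySem.Dict Int Int) (row : List Int × List Int) => (PySem.Set.ofList row.2).foldl (fun d x => d.insert x (d.getD x 0 + 1)) d)]
  have e1 : (h :: t).foldl (fun d row => (PySem.Set.ofList row.1).foldl (fun d x => d.insert x (d.getD x 0 + 1)) d) PySem.Dict.empty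
      = colDict ((h :: t).map (fun r => r.1)) PySem.Dict.empty := by
    rw [colDict, List.foldl_map]
  have e2 : (h :: t).foldl (fun d row => (PySem.Set.ofList row.2).foldl (fun d x => d.insert x (d.getD x 0 + 1)) d) PySem.Dict.empty
      = colDict ((h :: t).map (fun r => r.2)) PySem.Dict.empty := by
    rw [colDict, List.foldl_map]
  rw [e1, e2]
  have a1 : t.foldl (fun q r => PySem.Set.inter q (PySem.Set.ofList r.1)) (PySem.Set.ofList h.1)
      = (t.map (fun r => r.1)).foldl (fun q r => PySem.Set.inter q (PySem.Set.ofList r)) (PySem.Set.ofList h.1) := by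
    rw [List.foldl_map]
  have a2 : t.foldl (fun q r => PySem.Set.inter q (PySem.Set.ofList r.2)) (PySem.Set.ofList h.2)
      = (t.map (fun r => r.2)).foldl (fun q r => PySem.Set.inter q (PySem.Set.ofList r)) (PySem.Set.ofList h.2) := by
    rw [List.foldl_map]
  rw [a1, a2, col_main, col_main]
  simp

-- ===== VERDICT (by name: the statement is the Claim_ definition above) =====
theorem ne_intersection_spec : Claim_equal_ne_intersection := by
  intro s _ hpre
  unfold Spec_ne_intersection
  match s with
  | [] => exact absurd rfl hpre
  | h :: t => exact ne_intersection_cons h t
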